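-- pv_equiv track=rewrite | github.com/nicklave/Progetti_esercizi_unical | Esercizi_python/grafi speciali.py | massimoScore
-- ===== SOURCE A (Python) =====
-- def massimoScore(g):
--     massimo = 0                          # 1
--     for i in range(len(g)):              # n
--         count = 0                          # n-1
--         for j in range(len(g)):            # sum (1,n-1) di t
--             if (j + 1) % 2 != 0 and g[j][i] == 1:  # sum (1,n-1) t-1
--                 count += 1                # sum (1,n-1) t-1
--         if count > massimo:
--             massimo = count
--     return massimo
-- ===== SOURCE B (Python) =====
-- def massimoScore(g):
--     n = len(g)
--
--     def counts(rows):
--         # divide-and-conquer elementwise sum of the 0/1 indicator vectors of the rows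
--         if len(rows) == 0:
--             return [0] * n
--         if len(rows) == 1:
--             return [1 if rows[0][i] == 1 else 0 for i in range(n)]
--         m = len(rows) // 2
--         return [a + b for a, b in zip(counts(rows[:m]), counts(rows[m:]))]
--
--     return max(counts([g[j] for j in range(0, n, 2)]), default=0)
-- ===== Notes on version B (the rewrite author's own statement) =====
-- stated objective: alternative
-- what changed: Replaces the column-major double scan with a running max by a divide-and-conquer merge: the even-indexed rows are turned into 0/1 indicator vectors that are summed elementwise by recursively splitting the row list in half and zip-adding the two halves, and max() is taken once over the final vector.
import Mathlib
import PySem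

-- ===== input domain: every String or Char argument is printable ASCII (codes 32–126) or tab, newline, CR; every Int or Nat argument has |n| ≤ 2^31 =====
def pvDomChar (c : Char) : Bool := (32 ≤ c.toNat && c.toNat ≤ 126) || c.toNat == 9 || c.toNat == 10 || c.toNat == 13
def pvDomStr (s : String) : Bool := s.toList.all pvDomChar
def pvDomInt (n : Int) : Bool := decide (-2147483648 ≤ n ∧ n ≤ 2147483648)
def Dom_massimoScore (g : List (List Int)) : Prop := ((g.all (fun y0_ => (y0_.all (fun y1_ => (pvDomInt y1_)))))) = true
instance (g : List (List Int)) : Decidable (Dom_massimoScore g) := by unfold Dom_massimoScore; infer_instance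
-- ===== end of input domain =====

-- B replaces A's column-major double scan with a running max by a divide-and-conquer merge:
-- the even-indexed rows become 0/1 indicator vectors summed elementwise by recursively
-- splitting the row list in half and zip-adding the halves, with max() taken once at the end
-- (objective: alternative; same asymptotic cost).

-- ===== PORT A =====
def massimoScore (g : List (List Int)) : Int :=
  (PySem.List.pyRange 0 (PySem.List.len g) 1).foldl (fun massimo i =>
    let count := (PySem.List.pyRange 0 (PySem.List.len g) 1).foldl (fun count j =>
      if PySem.Int.mod (j + 1) 2 ≠ 0 ∧ PySem.List.pyGetD (PySem.List.pyGetD g j []) i 0 = 1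
      then count + 1 else count) 0
    if massimo < count then count else massimo) 0

-- ===== PORT B =====
-- Source B's inner helper `counts(rows)`: divide-and-conquer elementwise sum of indicator vectors
def massimoScoreCounts (n : Int) (rows : List (List Int)) : List Int :=
  if h0 : rows.length = 0 then List.replicate n.toNat 0
  else if h1 : rows.length = 1 then
    (PySem.List.pyRange 0 n 1).map (fun i =>
      if PySem.List.pyGetD (PySem.List.pyGetD rows 0 []) i 0 = 1 then 1 else 0)
  else
    ((massimoScoreCounts n (rows.take (rows.length / 2))).zip
      (massimoScoreCounts n (rows.drop (rows.length / 2)))).map (fun p => p.1 + p.2)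
termination_by rows.length
decreasing_by
  · simp only [List.length_take]; omega
  · simp only [List.length_drop]; omega

def massimoScore_alt (g : List (List Int)) : Int :=
  let n := PySem.List.len g
  let rows := (PySem.List.pyRange 0 n 2).map (fun j => PySem.List.pyGetD g j [])
  PySem.List.maxD (massimoScoreCounts n rows) (fun y => y) 0

-- ===== PRECONDITION & SPEC =====
-- Pre_ excludes exactly the ragged inputs on which the Python raises IndexError: both A and B
-- read g[j][i] for every even row index j < len(g) and every column i < len(g), so every
-- even-indexed row must have at least len(g) entries.
def Pre_massimoScore (g : List (List Int)) : Prop :=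
  ∀ j < g.length, j % 2 = 0 → g.length ≤ (g.getD j []).length
instance (g : List (List Int)) : Decidable (Pre_massimoScore g) := by
  unfold Pre_massimoScore; infer_instance

def pvWitness_massimoScore : List (List Int) := [[1, 0], [0, 1]]

def Spec_massimoScore (g : List (List Int)) (out : Int) : Prop := out = massimoScore_alt g
instance (g : List (List Int)) (out : Int) : Decidable (Spec_massimoScore g out) := by
  unfold Spec_massimoScore; infer_instance

-- ===== CLAIM (what is proved, stated in full; the proofs are below) =====
def Claim_equal_massimoScore : Prop :=
  ∀ (g : List (List Int)), Dom_massimoScore g → Pre_massimoScore g →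
    Spec_massimoScore g (massimoScore g)

-- ===== LEMMAS AND PROOFS =====

/-- A's inner loop, closed form: over all row indices j < len g, count the even j whose row has
a 1 in column `i`. -/
def colCnt (g : List (List Int)) (i : Nat) : Int :=
  ((List.range g.length).countP
    (fun j => (j % 2 == 0) && ((g.getD j []).getD i 0 == 1)) : Int)

/-- The same count enumerated over the even row indices 2*k only (B's row list). -/
def colCnt2 (g : List (List Int)) (i : Nat) : Int :=
  ((List.range ((g.length + 1) / 2)).countP
    (fun k => (g.getD (2 * k) []).getD i 0 == 1) : Int)

lemma ite_max (m c : Int) : (if m < c then c else m) = max m c := by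
  simp [max_def]; split_ifs <;> omega

lemma massimoScore_eq (g : List (List Int)) :
    massimoScore g = (List.range g.length).foldl (fun m i => max m (colCnt g i)) 0 := by
  unfold massimoScore
  rw [PySem.List.len_eq, PySem.List.pyRange_zero_nat, List.foldl_map]
  refine PySem.List.foldl_congr_mem _ _ _ _ ?_
  intro m i _
  simp only [List.foldl_map]
  have hside : ∀ (acc : Int), ∀ j ∈ List.range g.length,
      (if PySem.Int.mod ((j : Int) + 1) 2 ≠ 0 ∧
          PySem.List.pyGetD (PySem.List.pyGetD g (j : Int) []) ((i : Nat) : Int) 0 = 1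
       then acc + 1 else acc)
      = (if ((j % 2 == 0) && ((g.getD j []).getD i 0 == 1)) = true then acc + 1 else acc) := by
    intro acc j _
    have hmod : PySem.Int.mod ((j : Int) + 1) 2 = (((j + 1) % 2 : Nat) : Int) := by
      push_cast [← PySem.Int.mod_natCast]; norm_num
    have hc : (PySem.Int.mod ((j : Int) + 1) 2 ≠ 0 ∧
        PySem.List.pyGetD (PySem.List.pyGetD g (j : Int) []) ((i : Nat) : Int) 0 = 1) ↔
        ((j % 2 == 0) && ((g.getD j []).getD i 0 == 1)) = true := by
      simp only [hmod, PySem.List.pyGetD_natCast, Ne, Nat.cast_eq_zero,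
        Bool.and_eq_true, beq_iff_eq]
      constructor
      · rintro ⟨h1, h2⟩; exact ⟨by omega, h2⟩
      · rintro ⟨h1, h2⟩; exact ⟨by omega, h2⟩
    rw [if_congr hc rfl rfl]
  have hcnt := PySem.List.foldl_congr_mem (List.range g.length) _ _ (0 : Int) hside
  simp only [hcnt, PySem.List.foldl_count_if, ite_max]
  simp [colCnt]

/-- B's recursive helper computes, per column i < n, the count of rows whose entry i equals 1. -/
lemma counts_eq (n : Nat) (rows : List (List Int)) :
    massimoScoreCounts (n : Int) rows
      = (List.range n).map
          (fun i => ((rows.countP (fun r => r.getD i 0 == 1) : Nat) : Int)) := by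
  induction hL : rows.length using Nat.strong_induction_on generalizing rows with
  | _ L ih =>
    rw [massimoScoreCounts]
    by_cases h0 : rows.length = 0
    · rcases List.length_eq_zero_iff.mp h0 with rfl
      simp [List.map_const']
    · rw [dif_neg h0]
      by_cases h1 : rows.length = 1
      · rcases List.length_eq_one_iff.mp h1 with ⟨r, rfl⟩
        rw [dif_pos h1]
        rw [PySem.List.pyRange_zero_nat, List.map_map]
        apply List.map_congr_left
        intro i _
        simp only [Function.comp, PySem.List.pyGetD_natCast]
        simp [List.countP_cons]
      · rw [dif_neg h1]
        have h2 : 2 ≤ rows.length := by omega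
        have hm1 : (rows.take (rows.length / 2)).length = rows.length / 2 := by
          simp only [List.length_take]; omega
        have hm2 : (rows.drop (rows.length / 2)).length = rows.length - rows.length / 2 := by
          simp only [List.length_drop]
        rw [ih _ (by omega) _ hm1, ih _ (by omega) _ hm2]
        rw [List.zip_map', List.map_map]
        apply List.map_congr_left
        intro i _
        simp only [Function.comp]
        have hsplit : rows.countP (fun r => r.getD i 0 == 1)
            = (rows.take (rows.length / 2)).countP (fun r => r.getD i 0 == 1)
              + (rows.drop (rows.length / 2)).countP (fun r => r.getD i 0 == 1) := by
          conv_lhs => rw [← List.take_append_drop (rows.length / 2) rows]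
          rw [List.countP_append]
        rw [hsplit]; push_cast; ring

/-- The even-row list Source B builds, as a map over the even indices 2*k. -/
lemma rows_eq (g : List (List Int)) :
    (PySem.List.pyRange 0 (PySem.List.len g) 2).map (fun j => PySem.List.pyGetD g j [])
      = (List.range ((g.length + 1) / 2)).map (fun k => g.getD (2 * k) []) := by
  rw [PySem.List.len_eq, PySem.List.pyRange_of_pos _ _ (by norm_num)]
  have hlen : (if (0 : Int) < (g.length : Int)
      then (((g.length : Int) - 0 + 2 - 1) / 2).toNat else 0) = (g.length + 1) / 2 := by
    split_ifs with h <;> omega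
  rw [hlen, List.map_map]
  apply List.map_congr_left
  intro k _
  simp only [Function.comp]
  have : (0 : Int) + 2 * (k : Int) = ((2 * k : Nat) : Int) := by push_cast; ring
  rw [this, PySem.List.pyGetD_natCast]

lemma massimoScore_alt_eq (g : List (List Int)) :
    massimoScore_alt g
      = PySem.List.maxD ((List.range g.length).map (colCnt2 g)) (fun y => y) 0 := by
  show PySem.List.maxD
      (massimoScoreCounts (PySem.List.len g)
        ((PySem.List.pyRange 0 (PySem.List.len g) 2).map (fun j => PySem.List.pyGetD g j [])))
      (fun y => y) 0 = _
  rw [rows_eq]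
  have hn : PySem.List.len g = ((g.length : Nat) : Int) := PySem.List.len_eq g
  rw [hn, counts_eq]
  congr 1
  apply List.map_congr_left
  intro i _
  unfold colCnt2
  rw [List.countP_map]
  rfl

lemma maxD_nonneg (xs : List Int) (h : ∀ x ∈ xs, 0 ≤ x) :
    PySem.List.maxD xs (fun y => y) 0 = xs.foldl max 0 := by
  cases xs with
  | nil => simp [PySem.List.maxD, PySem.List.max?]
  | cons x t =>
    unfold PySem.List.maxD
    rw [PySem.List.max?_id_cons]
    simp only [Option.getD_some, List.foldl_cons]
    rw [max_eq_right (h x (by simp))]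

lemma countP_even_rows (q : Nat → Bool) (n : Nat) :
    (List.range n).countP (fun j => (j % 2 == 0) && q j)
      = (List.range ((n + 1) / 2)).countP (fun k => q (2 * k)) := by
  induction n with
  | zero => simp
  | succ n ih =>
    rw [List.range_succ, List.countP_append, ih, List.countP_cons, List.countP_nil]
    by_cases hn : n % 2 = 0
    · have h2 : (n + 1 + 1) / 2 = (n + 1) / 2 + 1 := by omega
      have h3 : 2 * ((n + 1) / 2) = n := by omega
      rw [h2, List.range_succ, List.countP_append, List.countP_cons, List.countP_nil, h3]
      simp [hn]
    · have h2 : (n + 1 + 1) / 2 = (n + 1) / 2 := by omega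
      rw [h2]
      simp [hn]

lemma colCnt_eq_colCnt2 (g : List (List Int)) (i : Nat) : colCnt g i = colCnt2 g i := by
  unfold colCnt colCnt2
  exact congrArg Nat.cast
    (countP_even_rows (fun j => ((g.getD j []).getD i 0 == 1)) g.length)

-- ===== VERDICT (by name: the statement is the Claim_ definition above) =====
theorem massimoScore_spec : Claim_equal_massimoScore := by
  intro g _ _
  unfold Spec_massimoScore
  rw [massimoScore_eq, massimoScore_alt_eq]
  have hnn : ∀ x ∈ (List.range g.length).map (colCnt2 g), 0 ≤ x := by
    intro x hx
    rcases List.mem_map.mp hx with ⟨i, _, rfl⟩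
    unfold colCnt2
    positivity
  rw [maxD_nonneg _ hnn, ← List.foldl_map]
  congr 1
  apply List.map_congr_left
  intro i _
  exact colCnt_eq_colCnt2 g i
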